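-- pv_equiv track=rewrite | github.com/bleedingrockk/ndps_app | app/components/historical_cases.py | extract_case_title
-- ===== SOURCE A (Python) =====
-- def extract_case_title(content):
--     """Extract case title from document content"""
--     if not content:
--         return None
--
--     lines = content.split('\n')
--     case_title = ""
--
--     # Look for case title in first 10 lines
--     for line in lines[:10]:
--         line = line.strip()
--         if line and len(line) > 10 and not line.isdigit() and not line.startswith('==='):
--             # Look for patterns like "vs.", "Vs.", "versus"
--             if any(keyword in line.lower() for keyword in ['vs.', 'versus', 'v.', 'v/s']):
--                 case_title = line
--                 break
--             elif not case_title and len(line) > 20: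
--                 case_title = line
--
--     return case_title
-- ===== SOURCE B (Python) =====
-- KEYWORDS = ['vs.', 'versus', 'v.', 'v/s']
--
--
-- def _is_candidate(line):
--     return len(line) > 10 and not line.isdigit() and not line.startswith('===')
--
--
-- def _has_keyword(line):
--     low = line.lower()
--     return any(k in low for k in KEYWORDS)
--
--
-- def extract_case_title(content):
--     """Extract case title from document content"""
--     if not content:
--         return None
--     candidates = [s for s in (ln.strip() for ln in content.split('\n')[:10])
--                   if _is_candidate(s)]
--     kw = next((s for s in candidates if _has_keyword(s)), None)
--     if kw is not None:
--         return kw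
--     return next((s for s in candidates if len(s) > 20), "")
-- ===== Notes on version B (the rewrite author's own statement) =====
-- stated objective: simpler
-- what changed: Replaces the stateful break/accumulator loop with a declarative pipeline: build the stripped candidate list once, then two next() scans (first keyword match, else first line longer than 20).
import Mathlib
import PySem

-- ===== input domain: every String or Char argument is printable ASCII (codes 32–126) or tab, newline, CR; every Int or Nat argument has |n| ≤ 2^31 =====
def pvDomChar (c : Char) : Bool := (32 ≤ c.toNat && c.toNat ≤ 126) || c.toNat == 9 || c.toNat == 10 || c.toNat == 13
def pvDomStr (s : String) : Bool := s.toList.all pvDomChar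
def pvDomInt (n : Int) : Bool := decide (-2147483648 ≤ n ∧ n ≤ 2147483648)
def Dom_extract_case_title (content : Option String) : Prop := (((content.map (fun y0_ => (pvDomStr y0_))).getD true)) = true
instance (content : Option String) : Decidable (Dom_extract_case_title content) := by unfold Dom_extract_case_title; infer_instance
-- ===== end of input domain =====

-- B is a simpler decomposition: precompute the candidate list, then two scans.
-- Equivalence is about the return value; neither program mutates its argument.

-- ===== PORT A =====
-- A's loop: stateful accumulator `case_title` with an early break on a keyword match.
def ectLoopA : List String → String → String
  | [], acc => acc
  | l :: ls, acc =>
    let line := PySem.Str.strip l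
    if !(line == "") && decide (10 < PySem.Str.len line)
        && !PySem.Str.strIsdigit line && !PySem.Str.startswith line "===" then
      if (["vs.", "versus", "v.", "v/s"].any (fun k => PySem.Str.isIn k (PySem.Str.lower line))) then
        line
      else if acc == "" && decide (20 < PySem.Str.len line) then
        ectLoopA ls line
      else
        ectLoopA ls acc
    else
      ectLoopA ls acc

def extract_case_title (content : Option String) : Option String :=
  match content with
  | none => none
  | some c =>
    if c == "" then none
    else
      some (ectLoopA (PySem.List.slice ((PySem.Str.split? c "\n").getD []) none (some 10)) "")

-- ===== PORT B =====
def ectIsCandidate (line : String) : Bool :=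
  decide (10 < PySem.Str.len line) && !PySem.Str.strIsdigit line
    && !PySem.Str.startswith line "==="

def ectHasKeyword (line : String) : Bool :=
  let low := PySem.Str.lower line
  ["vs.", "versus", "v.", "v/s"].any (fun k => PySem.Str.isIn k low)

def extract_case_title_alt (content : Option String) : Option String :=
  match content with
  | none => none
  | some c =>
    if c == "" then none
    else
      let candidates :=
        ((((PySem.Str.split? c "\n").getD []).take 10).map PySem.Str.strip).filter ectIsCandidate
      match candidates.find? ectHasKeyword with
      | some s => some s
      | none =>
        some ((candidates.find? (fun s => decide (20 < PySem.Str.len s))).getD "")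

-- ===== PRECONDITION & SPEC =====
def Spec_extract_case_title (content : Option String) (out : Option String) : Prop := out = extract_case_title_alt content
instance (content : Option String) (out : Option String) : Decidable (Spec_extract_case_title content out) := by unfold Spec_extract_case_title; infer_instance

-- ===== CLAIM (what is proved, stated in full; the proofs are below) =====
def Claim_equal_extract_case_title : Prop := ∀ (content : Option String), Dom_extract_case_title content → Spec_extract_case_title content (extract_case_title content)

-- ===== LEMMAS AND PROOFS =====

-- A's inline filter condition keeps the truthiness check `line`; it is redundant given len > 10.
theorem ect_cond_eq (s : String) :
    (!(s == "") && decide (10 < PySem.Str.len s)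
      && !PySem.Str.strIsdigit s && !PySem.Str.startswith s "===")
      = ectIsCandidate s := by
  by_cases h : s = ""
  · subst h; decide
  · simp [ectIsCandidate, beq_eq_false_iff_ne.mpr h, Bool.and_assoc]

-- A's inline keyword test is definitionally B's helper.
theorem ect_kw_def (s : String) :
    (["vs.", "versus", "v.", "v/s"].any (fun k => PySem.Str.isIn k (PySem.Str.lower s)))
      = ectHasKeyword s := rfl

theorem ectLoopA_eq (ls : List String) (acc : String) :
    ectLoopA ls acc =
      (let cands := (ls.map PySem.Str.strip).filter ectIsCandidate
       match cands.find? ectHasKeyword with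
       | some s => s
       | none =>
         if acc == "" then (cands.find? (fun s => decide (20 < PySem.Str.len s))).getD ""
         else acc) := by
  induction ls generalizing acc with
  | nil =>
    simp only [ectLoopA, List.map_nil, List.filter_nil, List.find?_nil]
    by_cases h : acc = "" <;> simp [h]
  | cons l ls ih =>
    simp only [ectLoopA, List.map_cons, List.filter_cons, ect_cond_eq, ect_kw_def]
    by_cases hc : ectIsCandidate (PySem.Str.strip l) = true
    · rw [if_pos hc, if_pos hc]
      by_cases hk : ectHasKeyword (PySem.Str.strip l) = true
      · rw [if_pos hk, List.find?_cons_of_pos hk]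
      · rw [if_neg hk, List.find?_cons_of_neg (by simpa using hk)]
        cases hf : ((ls.map PySem.Str.strip).filter ectIsCandidate).find? ectHasKeyword with
        | some t =>
          cases hcd : (acc == "" && decide (20 < PySem.Str.len (PySem.Str.strip l))) with
          | true => rw [if_pos rfl, ih]; simp [hf]
          | false => rw [if_neg (by simp), ih]; simp [hf]
        | none =>
          by_cases ha : (acc == "") = true
          · by_cases hl : decide (20 < PySem.Str.len (PySem.Str.strip l)) = true
            · rw [if_pos (by rw [ha, hl]; rfl), ih]
              simp only [hf]
              have hne : (PySem.Str.strip l == "") = true → False := by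
                intro hb
                have := eq_of_beq hb
                rw [this] at hl; exact absurd hl (by decide)
              rw [if_neg hne, ha, if_pos rfl,
                List.find?_cons_of_pos (p := fun s => decide (20 < PySem.Str.len s)) hl]
              rfl
            · rw [if_neg (by intro hb; rw [ha] at hb; simp at hb; exact hl (by simpa using hb)), ih]
              simp only [hf, ha]
              rw [List.find?_cons_of_neg (p := fun s => decide (20 < PySem.Str.len s)) (by simpa using hl)]
          · rw [if_neg (by intro hb; rw [Bool.and_eq_true] at hb; exact ha hb.1), ih]
            simp only [hf, ha]
            rfl
    · rw [if_neg hc, if_neg hc, ih]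

-- ===== VERDICT (by name: the statement is the Claim_ definition above) =====
theorem extract_case_title_spec : Claim_equal_extract_case_title := by
  intro content _
  unfold Spec_extract_case_title extract_case_title extract_case_title_alt
  cases content with
  | none => rfl
  | some c =>
    dsimp only
    by_cases h : (c == "") = true
    · rw [if_pos h, if_pos h]
    · rw [if_neg h, if_neg h]
      rw [PySem.List.slice_to _ (by norm_num), ectLoopA_eq]
      have h10 : ((10 : Int).toNat) = 10 := rfl
      rw [h10]
      cases hf : (((((PySem.Str.split? c "\n").getD []).take 10).map
          PySem.Str.strip).filter ectIsCandidate).find? ectHasKeyword with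
      | some s => dsimp only; rw [hf]
      | none => dsimp only; rw [hf]; rfl
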